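-- pv_equiv track=rewrite | github.com/nataliawcislo/euler | src/ex9.py | ex9
-- ===== SOURCE A (Python) =====
-- def ex9(x):
--     list = []
--     for b in range(1, x):
--         for c in range(1, x):
--             a = x - c - b
--             if pythagorean_triplet(a, b, c) == True:
--                 list.append([a, b, c])
--     return list
--
-- def pythagorean_triplet(a, b, c):
--     if 0<a<b<c:
--         if a ** 2 + b ** 2 == c ** 2:
--             return True
--     else:
--         return False
-- ===== SOURCE B (Python) =====
-- def ex9(x):
--     result = []
--     for b in range(1, x):
--         den = 2 * (x - b)
--         num = x * (x - 2 * b)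
--         if num % den == 0:
--             a = num // den
--             c = x - a - b
--             if 0 < a < b < c:
--                 result.append([a, b, c])
--     return result
-- ===== Notes on version B (the rewrite author's own statement) =====
-- stated objective: faster
-- what changed: B drops A's inner scan over c: for each b it solves a = x(x-2b)/(2(x-b)) in closed form, checks integrality and the strict ordering a < b < c, emitting at most one triple per b.
import Mathlib
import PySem

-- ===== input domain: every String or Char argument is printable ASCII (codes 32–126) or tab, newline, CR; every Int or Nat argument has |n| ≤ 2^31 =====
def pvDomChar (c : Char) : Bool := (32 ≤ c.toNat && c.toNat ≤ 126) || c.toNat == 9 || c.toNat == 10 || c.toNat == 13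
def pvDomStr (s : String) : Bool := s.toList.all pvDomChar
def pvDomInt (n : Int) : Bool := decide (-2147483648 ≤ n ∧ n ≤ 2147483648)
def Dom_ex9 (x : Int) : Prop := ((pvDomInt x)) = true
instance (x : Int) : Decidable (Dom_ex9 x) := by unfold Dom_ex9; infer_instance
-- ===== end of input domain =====

-- B replaces the inner O(x) scan over c by solving a = x(x-2b)/(2(x-b)) directly per b (O(x) total vs A's O(x^2)).

-- ===== PORT A =====
-- Python's pythagorean_triplet returns True / False / None; 'none' models the implicit None.
def pythagoreanTriplet (a b c : Int) : Option Bool :=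
  if 0 < a ∧ a < b ∧ b < c then
    (if a ^ 2 + b ^ 2 = c ^ 2 then some true else none)
  else some false

def ex9 (x : Int) : List (List Int) :=
  (PySem.List.pyRange 1 x 1).foldl (fun lst b =>
    (PySem.List.pyRange 1 x 1).foldl (fun lst c =>
      let a := x - c - b
      if pythagoreanTriplet a b c = some true then lst ++ [[a, b, c]] else lst) lst) []

-- ===== PORT B =====
def ex9_alt (x : Int) : List (List Int) :=
  (PySem.List.pyRange 1 x 1).foldl (fun result b =>
    let den := 2 * (x - b)
    let num := x * (x - 2 * b)
    if PySem.Int.mod num den = 0 then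
      let a := PySem.Int.floordiv num den
      let c := x - a - b
      if 0 < a ∧ a < b ∧ b < c then result ++ [[a, b, c]] else result
    else result) []

-- ===== PRECONDITION & SPEC =====
def Spec_ex9 (x : Int) (out : List (List Int)) : Prop := out = ex9_alt x
instance (x : Int) (out : List (List Int)) : Decidable (Spec_ex9 x out) := by unfold Spec_ex9; infer_instance

-- ===== CLAIM (what is proved, stated in full; the proofs are below) =====
def Claim_equal_ex9 : Prop := ∀ (x : Int), Dom_ex9 x → Spec_ex9 x (ex9 x)

-- ===== LEMMAS AND PROOFS =====

lemma foldl_congr_mem2 {α β : Type} {l : List α} {f g : β → α → β} {init : β}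
    (h : ∀ (acc : β) (a : α), a ∈ l → f acc a = g acc a) : l.foldl f init = l.foldl g init := by
  induction l generalizing init with
  | nil => rfl
  | cons a l ih =>
    simp only [List.foldl_cons]
    rw [h init a List.mem_cons_self]
    exact ih (fun acc a ha => h acc a (List.mem_cons_of_mem _ ha))

-- B's per-b contribution
def contribB (x b : Int) : List (List Int) :=
  if PySem.Int.mod (x * (x - 2 * b)) (2 * (x - b)) = 0 then
    if 0 < PySem.Int.floordiv (x * (x - 2 * b)) (2 * (x - b)) ∧
       PySem.Int.floordiv (x * (x - 2 * b)) (2 * (x - b)) < b ∧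
       b < x - PySem.Int.floordiv (x * (x - 2 * b)) (2 * (x - b)) - b
    then [[PySem.Int.floordiv (x * (x - 2 * b)) (2 * (x - b)), b,
           x - PySem.Int.floordiv (x * (x - 2 * b)) (2 * (x - b)) - b]]
    else []
  else []

-- A's inner-loop test, as a Boolean predicate on c
def testA (x b c : Int) : Bool :=
  decide (0 < x - c - b ∧ x - c - b < b ∧ b < c ∧ (x - c - b) ^ 2 + b ^ 2 = c ^ 2)

lemma pythTrip_iff (x b c : Int) :
    (pythagoreanTriplet (x - c - b) b c = some true) ↔ testA x b c = true := by
  simp only [pythagoreanTriplet, testA]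
  split_ifs with h1 h2 <;> simp_all

-- unique-satisfier filter lemma
lemma filter_eq_singleton_of_unique {p : Int → Bool} {l : List Int} (c₀ : Int)
    (hnd : l.Nodup) (hmem : c₀ ∈ l) (h : ∀ c ∈ l, p c = true ↔ c = c₀) :
    l.filter p = [c₀] := by
  induction l with
  | nil => cases hmem
  | cons a l ih =>
    simp only [List.nodup_cons] at hnd
    by_cases ha : a = c₀
    · subst ha
      have : l.filter p = [] := by
        apply List.filter_eq_nil_iff.mpr
        intro c hc hp
        have := (h c (List.mem_cons_of_mem _ hc)).mp hp
        exact hnd.1 (this ▸ hc)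
      simp [(h a (List.mem_cons_self)).mpr rfl, this]
    · have hpa : p a = false := by
        by_contra hpa
        exact ha ((h a List.mem_cons_self).mp (by simpa using hpa))
      have hmem' : c₀ ∈ l := by
        rcases List.mem_cons.mp hmem with h' | h'
        · exact absurd h'.symm ha
        · exact h'
      rw [List.filter_cons_of_neg (by simp [hpa])]
      exact ih hnd.2 hmem' (fun c hc => h c (List.mem_cons_of_mem _ hc))

-- the arithmetic core: for 1 ≤ b < x, A's inner loop over c yields exactly B's contribution
lemma inner_eq_contrib (x b : Int) (hb1 : 1 ≤ b) (hbx : b < x) :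
    ((PySem.List.pyRange 1 x 1).filter (testA x b)).map (fun c => [x - c - b, b, c])
      = contribB x b := by
  have hden : (0:Int) < 2 * (x - b) := by omega
  by_cases hdvd : PySem.Int.mod (x * (x - 2 * b)) (2 * (x - b)) = 0
  · unfold contribB
    rw [if_pos hdvd]
    have hdvd' : (2 * (x - b)) ∣ (x * (x - 2 * b)) :=
      (PySem.Int.mod_eq_zero_iff_dvd _ _).mp hdvd
    set a := PySem.Int.floordiv (x * (x - 2 * b)) (2 * (x - b)) with ha
    have haval : a * (2 * (x - b)) = x * (x - 2 * b) := by
      obtain ⟨k, hk⟩ := hdvd'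
      have : a = k := by
        rw [ha, hk, PySem.Int.floordiv_eq_ediv_of_pos hden]
        exact Int.mul_ediv_cancel_left k (by omega)
      rw [this, hk]; ring
    set c₀ := x - a - b with hc₀
    -- characterize testA: testA x b c ↔ (c = c₀ ∧ 0 < a ∧ a < b ∧ b < c₀)
    have hchar : ∀ c : Int, testA x b c = true ↔ (c = c₀ ∧ 0 < a ∧ a < b ∧ b < c₀) := by
      intro c
      simp only [testA, decide_eq_true_eq]
      constructor
      · rintro ⟨h1, h2, h3, h4⟩
        -- from the equation: (x-c-b) * (2*(x-b)) = x*(x-2b), so x-c-b = a, i.e. c = c₀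
        have heq : (x - c - b) * (2 * (x - b)) = x * (x - 2 * b) := by nlinarith
        have hac : x - c - b = a := by
          have := haval
          nlinarith [heq, this]
        have hcc : c = c₀ := by omega
        subst hcc
        exact ⟨rfl, by omega, by omega, by omega⟩
      · rintro ⟨hcc, h1, h2, h3⟩
        subst hcc
        refine ⟨by omega, by omega, h3, ?_⟩
        have : (x - c₀ - b) = a := by omega
        rw [this]
        nlinarith [haval]
    by_cases hcond : 0 < a ∧ a < b ∧ b < c₀
    · have hmem : c₀ ∈ PySem.List.pyRange 1 x 1 := by
        rw [PySem.List.mem_pyRange_one]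
        omega
      rw [filter_eq_singleton_of_unique c₀ (PySem.List.nodup_pyRange_one 1 x) hmem
        (fun c _ => by rw [hchar c]; constructor
                       · rintro ⟨h, _⟩; exact h
                       · rintro rfl; exact ⟨rfl, hcond⟩)]
      simp only [List.map]
      rw [if_pos hcond]
      have hxa : x - c₀ - b = a := by omega
      rw [hxa]
    · rw [if_neg hcond]
      have : (PySem.List.pyRange 1 x 1).filter (testA x b) = [] := by
        apply List.filter_eq_nil_iff.mpr
        intro c _ hp
        exact hcond ((hchar c).mp hp).2
      rw [this, List.map_nil]
  · unfold contribB
    rw [if_neg hdvd]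
    have : (PySem.List.pyRange 1 x 1).filter (testA x b) = [] := by
      apply List.filter_eq_nil_iff.mpr
      intro c _ hp
      simp only [testA, decide_eq_true_eq] at hp
      obtain ⟨h1, h2, h3, h4⟩ := hp
      apply hdvd
      rw [PySem.Int.mod_eq_zero_iff_dvd]
      exact ⟨x - c - b, by nlinarith⟩
    rw [this, List.map_nil]

lemma flatMap_congr_mem {α β : Type} {l : List α} {f g : α → List β}
    (h : ∀ a ∈ l, f a = g a) : l.flatMap f = l.flatMap g := by
  induction l with
  | nil => rfl
  | cons a l ih =>
    simp only [List.flatMap_cons]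
    rw [h a List.mem_cons_self, ih (fun a ha => h a (List.mem_cons_of_mem _ ha))]

-- ===== VERDICT (by name: the statement is the Claim_ definition above) =====
theorem ex9_spec : Claim_equal_ex9 := by
  intro x _
  unfold Spec_ex9 ex9 ex9_alt
  -- rewrite A's outer loop: each body is acc ++ (inner contribution)
  have hA : ∀ (init : List (List Int)),
      (PySem.List.pyRange 1 x 1).foldl (fun lst b =>
        (PySem.List.pyRange 1 x 1).foldl (fun lst c =>
          let a := x - c - b
          if pythagoreanTriplet a b c = some true then lst ++ [[a, b, c]] else lst) lst) init
      = init ++ (PySem.List.pyRange 1 x 1).flatMap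
          (fun b => ((PySem.List.pyRange 1 x 1).filter (testA x b)).map
            (fun c => [x - c - b, b, c])) := by
    intro init
    have hbody : ∀ (lst : List (List Int)) (b : Int),
        (PySem.List.pyRange 1 x 1).foldl (fun lst c =>
          let a := x - c - b
          if pythagoreanTriplet a b c = some true then lst ++ [[a, b, c]] else lst) lst
        = lst ++ ((PySem.List.pyRange 1 x 1).filter (testA x b)).map
            (fun c => [x - c - b, b, c]) := by
      intro lst b
      have := PySem.List.foldl_append_if (l := PySem.List.pyRange 1 x 1)
        (p := testA x b) (f := fun c => [x - c - b, b, c]) (acc := lst)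
      rw [← this]
      apply foldl_congr_mem2
      intro acc c _
      simp only [pythTrip_iff]
    calc (PySem.List.pyRange 1 x 1).foldl _ init
        = (PySem.List.pyRange 1 x 1).foldl (fun lst b => lst ++
            ((PySem.List.pyRange 1 x 1).filter (testA x b)).map
              (fun c => [x - c - b, b, c])) init := by
          apply foldl_congr_mem2
          intro acc b _
          exact hbody acc b
      _ = _ := PySem.List.foldl_append_eq_flatMap _ _ _
  have hB :
      (PySem.List.pyRange 1 x 1).foldl (fun result b =>
        let den := 2 * (x - b)
        let num := x * (x - 2 * b)
        if PySem.Int.mod num den = 0 then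
          let a := PySem.Int.floordiv num den
          let c := x - a - b
          if 0 < a ∧ a < b ∧ b < c then result ++ [[a, b, c]] else result
        else result) []
      = ([] : List (List Int)) ++ (PySem.List.pyRange 1 x 1).flatMap (contribB x) := by
    rw [← PySem.List.foldl_append_eq_flatMap]
    apply foldl_congr_mem2
    intro acc b _
    simp only [contribB]
    split_ifs <;> simp
  rw [hA, hB]
  simp only [List.nil_append]
  apply flatMap_congr_mem
  intro b hb
  rw [PySem.List.mem_pyRange_one] at hb
  exact inner_eq_contrib x b hb.1 hb.2
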